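-- pv_equiv track=rewrite | github.com/ruzzajv/PO-metodos-iniciais | aproximacao_de_vogel_v2.py | _calcular_penalidades
-- ===== SOURCE A (Python) =====
-- from typing import Literal
--
-- INF = 100_000_000
--
-- def _diferenca_dois_menores(valores: list[int]) -> int:
--     """Diferença entre os dois menores valores (O(n)); 0 se houver < 2 valores."""
--     menor1 = INF
--     menor2 = INF
--     for valor in valores:
--         if valor < menor1:
--             menor2 = menor1
--             menor1 = valor
--         elif valor < menor2:
--             menor2 = valor
--     if INF in [menor1, menor2]:
--         return 0
--     return menor2 - menor1
--
-- def _calcular_penalidades(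
--     custos: list[list[int]], oferta_restante: list[int], demanda_restante: list[int],
--     eixo: Literal["linha", "coluna"],
-- ) -> list[int]:
--     """
--     Calcula penalidades de Vogel para linhas ou colunas usando um único loop.
--     Retorna -1 para índices inativos (sem oferta/demanda restante).
--     """
--     qtd_linhas = len(oferta_restante)
--     qtd_colunas = len(demanda_restante)
--
--     if eixo == "linha":
--         tamanho = qtd_linhas
--         ativo_no_eixo = oferta_restante
--         custos_disponiveis = lambda k: [
--             custos[k][j] for j, demanda
--             in enumerate(demanda_restante)
--             if demanda > 0
--         ]
--     else: # == "coluna"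
--         tamanho = qtd_colunas
--         ativo_no_eixo = demanda_restante
--         custos_disponiveis = lambda k: [
--             custos[i][k] for i, oferta
--             in enumerate(oferta_restante)
--             if oferta > 0
--         ]
--
--     penalidades = []
--     for idx in range(tamanho):
--         if ativo_no_eixo[idx] > 0:
--             custos_validos = custos_disponiveis(idx)
--             penalidades.append(_diferenca_dois_menores(custos_validos) if custos_validos else -1)
--         else:
--             penalidades.append(-1)  # (sem oferta/demanda restante)
--
--     return penalidades
-- ===== SOURCE B (Python) =====
-- INF = 100_000_000
--
-- def _penalidade(custos_validos: list[int]) -> int: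
--     """-1 for no available cost; else the gap between the two smallest finite costs (0 if < 2)."""
--     if not custos_validos:
--         return -1
--     finitos = sorted(c for c in custos_validos if c < INF)
--     if len(finitos) < 2:
--         return 0
--     return finitos[1] - finitos[0]
--
-- def _calcular_penalidades(custos, oferta_restante, demanda_restante, eixo):
--     if eixo == "linha":
--         return [
--             _penalidade([custos[i][j] for j, d in enumerate(demanda_restante) if d > 0])
--             if o > 0 else -1
--             for i, o in enumerate(oferta_restante)
--         ]
--     return [
--         _penalidade([custos[i][j] for i, o in enumerate(oferta_restante) if o > 0])
--         if d > 0 else -1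
--         for j, d in enumerate(demanda_restante)
--     ]
-- ===== Notes on version B (the rewrite author's own statement) =====
-- stated objective: simpler
-- what changed: Replaces A's index-loop with append accumulator and hand-rolled two-smallest tracking scan by comprehension-style maps over enumerate plus sort-based selection: filter out costs >= INF, sort, and subtract the first two.
import Mathlib
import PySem

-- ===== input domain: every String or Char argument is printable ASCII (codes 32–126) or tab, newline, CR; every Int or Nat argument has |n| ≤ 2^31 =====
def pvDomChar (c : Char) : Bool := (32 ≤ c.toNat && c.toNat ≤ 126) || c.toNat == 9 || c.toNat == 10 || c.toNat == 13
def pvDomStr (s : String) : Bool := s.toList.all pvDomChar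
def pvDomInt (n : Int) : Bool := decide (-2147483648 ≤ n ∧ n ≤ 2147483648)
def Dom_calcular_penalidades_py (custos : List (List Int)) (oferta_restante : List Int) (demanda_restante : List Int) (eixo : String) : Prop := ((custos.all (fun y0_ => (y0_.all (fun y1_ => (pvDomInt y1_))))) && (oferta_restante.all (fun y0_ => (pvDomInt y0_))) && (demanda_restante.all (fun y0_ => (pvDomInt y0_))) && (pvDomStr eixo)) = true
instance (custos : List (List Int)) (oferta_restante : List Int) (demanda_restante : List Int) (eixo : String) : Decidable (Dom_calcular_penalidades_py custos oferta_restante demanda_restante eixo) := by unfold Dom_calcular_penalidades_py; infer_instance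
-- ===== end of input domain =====

-- B replaces A's append-loop plus hand-rolled two-smallest scan with comprehension-style maps and
-- sort-based selection of the two smallest finite costs (objective: simpler; same return value).

-- ===== PORT A =====
def pyINF : Int := 100000000

-- the body of _diferenca_dois_menores's for-loop (menor1, menor2 tracking)
def vogelStep (m : Int × Int) (v : Int) : Int × Int :=
  if v < m.1 then (v, m.1) else if v < m.2 then (m.1, v) else m

def diferenca_dois_menores (valores : List Int) : Int :=
  let p := valores.foldl vogelStep (pyINF, pyINF)
  if pyINF == p.1 || pyINF == p.2 then 0 else p.2 - p.1

def calcular_penalidades_py (custos : List (List Int)) (oferta_restante : List Int) (demanda_restante : List Int) (eixo : String) : List Int :=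
  if eixo = "linha" then
    (PySem.List.pyRange 0 (PySem.List.len oferta_restante) 1).foldl (fun pen idx =>
      if 0 < PySem.List.pyGetD oferta_restante idx 0 then
        let cv := ((PySem.List.enumerate demanda_restante).filter (fun p => 0 < p.2)).map
          (fun p => PySem.List.pyGetD (PySem.List.pyGetD custos idx []) p.1 0)
        pen ++ [if cv ≠ [] then diferenca_dois_menores cv else -1]
      else pen ++ [-1]) []
  else
    (PySem.List.pyRange 0 (PySem.List.len demanda_restante) 1).foldl (fun pen idx =>
      if 0 < PySem.List.pyGetD demanda_restante idx 0 then
        let cv := ((PySem.List.enumerate oferta_restante).filter (fun p => 0 < p.2)).map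
          (fun p => PySem.List.pyGetD (PySem.List.pyGetD custos p.1 []) idx 0)
        pen ++ [if cv ≠ [] then diferenca_dois_menores cv else -1]
      else pen ++ [-1]) []

-- ===== PORT B =====
def penalidade_alt (custos_validos : List Int) : Int :=
  if custos_validos = [] then -1
  else
    match PySem.List.sorted (custos_validos.filter (fun c => c < pyINF)) (fun x => x) false with
    | a :: b :: _ => b - a
    | _ => 0

def calcular_penalidades_py_alt (custos : List (List Int)) (oferta_restante : List Int) (demanda_restante : List Int) (eixo : String) : List Int :=
  if eixo = "linha" then
    (PySem.List.enumerate oferta_restante).map (fun io =>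
      if 0 < io.2 then
        penalidade_alt (((PySem.List.enumerate demanda_restante).filter (fun p => 0 < p.2)).map
          (fun p => PySem.List.pyGetD (PySem.List.pyGetD custos io.1 []) p.1 0))
      else -1)
  else
    (PySem.List.enumerate demanda_restante).map (fun jd =>
      if 0 < jd.2 then
        penalidade_alt (((PySem.List.enumerate oferta_restante).filter (fun p => 0 < p.2)).map
          (fun p => PySem.List.pyGetD (PySem.List.pyGetD custos p.1 []) jd.1 0))
      else -1)

-- ===== PRECONDITION & SPEC =====
-- Pre_ excludes exactly the inputs on which A raises IndexError: an active row/column pair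
-- whose cost entry custos[i][j] does not exist.
def Pre_calcular_penalidades_py (custos : List (List Int)) (oferta_restante : List Int) (demanda_restante : List Int) (eixo : String) : Prop :=
  ∀ i < oferta_restante.length, ∀ j < demanda_restante.length,
    0 < oferta_restante.getD i 0 → 0 < demanda_restante.getD j 0 →
      i < custos.length ∧ j < (custos.getD i []).length
instance (custos : List (List Int)) (oferta_restante : List Int) (demanda_restante : List Int) (eixo : String) : Decidable (Pre_calcular_penalidades_py custos oferta_restante demanda_restante eixo) := by unfold Pre_calcular_penalidades_py; infer_instance

def pvWitness_calcular_penalidades_py : List (List Int) × List Int × List Int × String :=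
  ([[1, 4], [3, 2]], [5, 5], [4, 6], "linha")

def Spec_calcular_penalidades_py (custos : List (List Int)) (oferta_restante : List Int) (demanda_restante : List Int) (eixo : String) (out : List Int) : Prop := out = calcular_penalidades_py_alt custos oferta_restante demanda_restante eixo
instance (custos : List (List Int)) (oferta_restante : List Int) (demanda_restante : List Int) (eixo : String) (out : List Int) : Decidable (Spec_calcular_penalidades_py custos oferta_restante demanda_restante eixo out) := by unfold Spec_calcular_penalidades_py; infer_instance

-- ===== CLAIM (what is proved, stated in full; the proofs are below) =====
def Claim_equal_calcular_penalidades_py : Prop := ∀ (custos : List (List Int)) (oferta_restante : List Int) (demanda_restante : List Int) (eixo : String), Dom_calcular_penalidades_py custos oferta_restante demanda_restante eixo → Pre_calcular_penalidades_py custos oferta_restante demanda_restante eixo → Spec_calcular_penalidades_py custos oferta_restante demanda_restante eixo (calcular_penalidades_py custos oferta_restante demanda_restante eixo)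

-- ===== LEMMAS AND PROOFS =====

-- moving a fresh element past the two heads of a permutation
lemma perm_push3 (x n1 n2 b c : Int) (rest l : List Int)
    (h : (n1 :: n2 :: rest).Perm (b :: c :: l)) :
    (n1 :: n2 :: x :: rest).Perm (b :: c :: x :: l) :=
  ((List.Perm.swap x n2 rest).cons n1).trans
    ((List.Perm.swap x n1 (n2 :: rest)).trans
      ((h.cons x).trans
        ((List.Perm.swap x b (c :: l)).symm.trans
          ((List.Perm.swap x c l).symm.cons b))))

-- rotating the first element past the next two
lemma perm_rot3 (v a b : Int) (l : List Int) : (v :: a :: b :: l).Perm (a :: b :: v :: l) :=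
  (List.Perm.swap v a (b :: l)).symm.trans ((List.Perm.swap v b l).symm.cons a)

-- Invariant of A's two-smallest scan: the final pair lists the two smallest elements of the
-- initial pair plus the scanned list (the rest being a permutation remainder, all ≥ the second).
lemma vogel_fold_inv (l : List Int) : ∀ m1 m2 : Int, m1 ≤ m2 →
    ∃ rest : List Int,
      ((l.foldl vogelStep (m1, m2)).1 :: (l.foldl vogelStep (m1, m2)).2 :: rest).Perm (m1 :: m2 :: l) ∧
      (l.foldl vogelStep (m1, m2)).1 ≤ (l.foldl vogelStep (m1, m2)).2 ∧
      (l.foldl vogelStep (m1, m2)).2 ≤ m2 ∧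
      (∀ x ∈ rest, (l.foldl vogelStep (m1, m2)).2 ≤ x) := by
  induction l with
  | nil =>
    intro m1 m2 h12
    exact ⟨[], List.Perm.refl _, h12, le_refl _, by simp⟩
  | cons v l ih =>
    intro m1 m2 h12
    by_cases h1 : v < m1
    · have step : (v :: l).foldl vogelStep (m1, m2) = l.foldl vogelStep (v, m1) := by
        simp [List.foldl_cons, vogelStep, h1]
      obtain ⟨rest, hperm, hle, hle2, hrest⟩ := ih v m1 (le_of_lt h1)
      refine ⟨m2 :: rest, ?_, ?_, ?_, ?_⟩
      · rw [step]
        exact (perm_push3 m2 _ _ v m1 rest l hperm).trans (perm_rot3 v m1 m2 l)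
      · rw [step]; exact hle
      · rw [step]; exact le_trans hle2 h12
      · rw [step]; intro x hx
        rcases List.mem_cons.mp hx with rfl | hx
        · exact le_trans hle2 h12
        · exact hrest x hx
    · by_cases h2 : v < m2
      · have step : (v :: l).foldl vogelStep (m1, m2) = l.foldl vogelStep (m1, v) := by
          simp [List.foldl_cons, vogelStep, h1, h2]
        obtain ⟨rest, hperm, hle, hle2, hrest⟩ := ih m1 v (le_of_not_gt h1)
        refine ⟨m2 :: rest, ?_, ?_, ?_, ?_⟩
        · rw [step]
          exact (perm_push3 m2 _ _ m1 v rest l hperm).trans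
            ((List.Perm.swap m2 v l).cons m1)
        · rw [step]; exact hle
        · rw [step]; exact le_trans hle2 (le_of_lt h2)
        · rw [step]; intro x hx
          rcases List.mem_cons.mp hx with rfl | hx
          · exact le_trans hle2 (le_of_lt h2)
          · exact hrest x hx
      · have step : (v :: l).foldl vogelStep (m1, m2) = l.foldl vogelStep (m1, m2) := by
          simp [List.foldl_cons, vogelStep, h1, h2]
        obtain ⟨rest, hperm, hle, hle2, hrest⟩ := ih m1 m2 h12
        refine ⟨v :: rest, ?_, ?_, ?_, ?_⟩
        · rw [step]
          exact perm_push3 v _ _ m1 m2 rest l hperm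
        · rw [step]; exact hle
        · rw [step]; exact hle2
        · rw [step]; intro x hx
          rcases List.mem_cons.mp hx with rfl | hx
          · exact le_trans hle2 (le_of_not_gt h2)
          · exact hrest x hx

-- The per-index value: B's sort-based helper equals A's scan (guarded by A's emptiness test).
lemma penalidade_alt_eq (cv : List Int) :
    penalidade_alt cv = if cv ≠ [] then diferenca_dois_menores cv else -1 := by
  by_cases hcv : cv = []
  · simp [penalidade_alt, hcv]
  · obtain ⟨rest, hperm, hle, hle2, hrest⟩ := vogel_fold_inv cv pyINF pyINF le_rfl
    set p := cv.foldl vogelStep (pyINF, pyINF) with hp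
    have hFperm : (cv.filter (fun c => decide (c < pyINF))).Perm
        ((p.1 :: p.2 :: rest).filter (fun c => decide (c < pyINF))) := by
      have h := hperm.filter (fun c => decide (c < pyINF))
      have hnot : (pyINF :: pyINF :: cv).filter (fun c => decide (c < pyINF))
          = cv.filter (fun c => decide (c < pyINF)) := by
        simp
      rw [hnot] at h
      exact h.symm
    by_cases h2 : p.2 < pyINF
    · -- both tracked values are finite: sorted finitos starts with p.1, p.2
      have h1 : p.1 < pyINF := lt_of_le_of_lt hle h2
      have hfil : (p.1 :: p.2 :: rest).filter (fun c => decide (c < pyINF))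
          = p.1 :: p.2 :: rest.filter (fun c => decide (c < pyINF)) := by
        simp [h1, h2]
      have hsorted : PySem.List.sorted (cv.filter (fun c => decide (c < pyINF))) (fun x => x) false
          = p.1 :: p.2 :: PySem.List.sorted (rest.filter (fun c => decide (c < pyINF))) (fun x => x) false := by
        apply PySem.List.sorted_id_eq_of_perm_of_pairwise
        · refine List.Perm.trans ?_ hFperm.symm
          rw [hfil]
          exact ((PySem.List.sorted_perm _ _ _).cons p.2).cons p.1
        · refine List.pairwise_cons.mpr ⟨?_, List.pairwise_cons.mpr ⟨?_, ?_⟩⟩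
          · intro b hb
            rcases List.mem_cons.mp hb with rfl | hb
            · exact hle
            · rw [PySem.List.mem_sorted] at hb
              exact le_trans hle (hrest b (List.mem_filter.mp hb).1)
          · intro b hb
            rw [PySem.List.mem_sorted] at hb
            exact hrest b (List.mem_filter.mp hb).1
          · exact PySem.List.sorted_pairwise _ _
      have hne1 : (pyINF == p.1) = false := beq_eq_false_iff_ne.mpr (ne_of_gt h1)
      have hne2 : (pyINF == p.2) = false := beq_eq_false_iff_ne.mpr (ne_of_gt h2)
      have hA : diferenca_dois_menores cv = p.2 - p.1 := by
        simp [diferenca_dois_menores, ← hp, hne1, hne2]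
      have hB : penalidade_alt cv = p.2 - p.1 := by
        simp [penalidade_alt, hcv, hsorted]
      simp [hcv, hA, hB]
    · -- fewer than two finite values: both return 0
      have hrestnil : rest.filter (fun c => decide (c < pyINF)) = [] := by
        apply List.filter_eq_nil_iff.mpr
        intro x hx
        simp only [decide_eq_true_eq, not_lt]
        exact le_trans (le_of_not_gt h2) (hrest x hx)
      have hlen : (PySem.List.sorted (cv.filter (fun c => decide (c < pyINF))) (fun x => x) false).length ≤ 1 := by
        rw [PySem.List.length_sorted, hFperm.length_eq]
        simp only [List.filter_cons, hrestnil]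
        have h2f : decide (p.2 < pyINF) = false := by simp [h2]
        rw [h2f]
        cases h : decide (p.1 < pyINF) <;> simp
      have h2top : (pyINF == p.2) = true := by
        have : p.2 = pyINF := le_antisymm hle2 (le_of_not_gt h2)
        simp [this]
      have hA : diferenca_dois_menores cv = 0 := by
        simp [diferenca_dois_menores, ← hp, h2top]
      have hB : penalidade_alt cv = 0 := by
        rw [penalidade_alt, if_neg hcv]
        rcases hs : PySem.List.sorted (cv.filter (fun c => decide (c < pyINF))) (fun x => x) false with _ | ⟨a, _ | ⟨b, t⟩⟩
        · rfl
        · rfl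
        · rw [hs] at hlen; simp at hlen
      simp [hcv, hA, hB]

-- A's append loop over range(len xs) equals B's map over enumerate xs.
lemma outer_loop_eq (xs : List Int) (g : Int → Int) :
    (PySem.List.pyRange 0 (PySem.List.len xs) 1).foldl
      (fun pen idx => if 0 < PySem.List.pyGetD xs idx 0 then pen ++ [g idx] else pen ++ [-1]) []
    = (PySem.List.enumerate xs).map (fun p => if 0 < p.2 then g p.1 else -1) := by
  have hbody : (fun (pen : List Int) (idx : Int) =>
      if 0 < PySem.List.pyGetD xs idx 0 then pen ++ [g idx] else pen ++ [-1])
      = (fun pen idx => pen ++ [if 0 < PySem.List.pyGetD xs idx 0 then g idx else -1]) := by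
    funext pen idx
    split <;> rfl
  rw [hbody, PySem.List.foldl_append_singleton_eq_map,
    PySem.List.enumerate_eq_map_pyRange (d := 0), List.map_map]
  rfl

theorem calc_pen_eq (custos : List (List Int)) (oferta_restante : List Int) (demanda_restante : List Int) (eixo : String) :
    calcular_penalidades_py custos oferta_restante demanda_restante eixo
    = calcular_penalidades_py_alt custos oferta_restante demanda_restante eixo := by
  unfold calcular_penalidades_py calcular_penalidades_py_alt
  by_cases he : eixo = "linha"
  · simp only [he, if_true]
    have hA : (fun (pen : List Int) (idx : Int) =>
        if 0 < PySem.List.pyGetD oferta_restante idx 0 then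
          let cv := ((PySem.List.enumerate demanda_restante).filter (fun p => 0 < p.2)).map
            (fun p => PySem.List.pyGetD (PySem.List.pyGetD custos idx []) p.1 0)
          pen ++ [if cv ≠ [] then diferenca_dois_menores cv else -1]
        else pen ++ [-1])
        = (fun pen idx =>
        if 0 < PySem.List.pyGetD oferta_restante idx 0 then
          pen ++ [penalidade_alt (((PySem.List.enumerate demanda_restante).filter (fun p => 0 < p.2)).map
            (fun p => PySem.List.pyGetD (PySem.List.pyGetD custos idx []) p.1 0))]
        else pen ++ [-1]) := by
      funext pen idx
      split
      · rw [penalidade_alt_eq]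
      · rfl
    rw [hA, outer_loop_eq]
  · simp only [he, if_false]
    have hA : (fun (pen : List Int) (idx : Int) =>
        if 0 < PySem.List.pyGetD demanda_restante idx 0 then
          let cv := ((PySem.List.enumerate oferta_restante).filter (fun p => 0 < p.2)).map
            (fun p => PySem.List.pyGetD (PySem.List.pyGetD custos p.1 []) idx 0)
          pen ++ [if cv ≠ [] then diferenca_dois_menores cv else -1]
        else pen ++ [-1])
        = (fun pen idx =>
        if 0 < PySem.List.pyGetD demanda_restante idx 0 then
          pen ++ [penalidade_alt (((PySem.List.enumerate oferta_restante).filter (fun p => 0 < p.2)).map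
            (fun p => PySem.List.pyGetD (PySem.List.pyGetD custos p.1 []) idx 0))]
        else pen ++ [-1]) := by
      funext pen idx
      split
      · rw [penalidade_alt_eq]
      · rfl
    rw [hA, outer_loop_eq]

-- ===== VERDICT (by name: the statement is the Claim_ definition above) =====
theorem calcular_penalidades_py_spec : Claim_equal_calcular_penalidades_py := by
  intro custos oferta demanda eixo _ _
  unfold Spec_calcular_penalidades_py
  exact calc_pen_eq custos oferta demanda eixo
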